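-- pv_equiv track=rewrite | github.com/tloja/RateDebate | RateDebate.py | filter_speakers
-- ===== SOURCE A (Python) =====
-- def filter_speakers(speakers_list):
-- 	"""
-- 	Creates a dictionary where each speaker key has an array of dictionaries as its value
-- 	"""
-- 	filtered_dict = {}
-- 	for dictionary in speakers_list:
-- 		speaker = dictionary["speaker"]
-- 		if speaker not in filtered_dict:
-- 			filtered_dict[speaker] = []
-- 		filtered_dict[speaker].append(dictionary)
-- 	return filtered_dict
-- ===== SOURCE B (Python) =====
-- def filter_speakers(speakers_list):
--     """Same grouping, built as distinct-keys-then-per-key scans instead of one accumulating pass."""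
--     keys = list(dict.fromkeys(d["speaker"] for d in speakers_list))
--     return {s: [d for d in speakers_list if d["speaker"] == s] for s in keys}
-- ===== Notes on version B (the rewrite author's own statement) =====
-- stated objective: alternative
-- what changed: Replaces A's single accumulating dict-append pass with a two-phase shape: first collect the distinct speakers in order of first appearance (dict.fromkeys), then build each group by an independent scan of the whole list per speaker.
import Mathlib
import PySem

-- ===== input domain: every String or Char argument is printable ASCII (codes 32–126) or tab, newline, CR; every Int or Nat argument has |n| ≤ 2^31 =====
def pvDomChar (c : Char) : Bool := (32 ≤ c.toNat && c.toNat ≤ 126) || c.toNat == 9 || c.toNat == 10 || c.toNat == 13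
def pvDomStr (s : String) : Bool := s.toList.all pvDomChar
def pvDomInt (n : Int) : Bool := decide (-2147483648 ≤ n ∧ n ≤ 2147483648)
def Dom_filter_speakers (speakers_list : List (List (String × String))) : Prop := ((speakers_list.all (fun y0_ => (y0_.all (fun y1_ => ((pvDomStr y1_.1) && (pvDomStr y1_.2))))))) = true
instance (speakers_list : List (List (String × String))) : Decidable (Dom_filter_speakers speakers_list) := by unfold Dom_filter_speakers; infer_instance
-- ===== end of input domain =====

-- B builds the same grouping by a distinct-keys-then-per-key-scan shape instead of A's single
-- accumulating pass ('alternative'; same return value wherever A returns).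

-- shared helper: dictionary["speaker"] as first-match association-list lookup, totalized with ""
-- (Pre_ admits only inputs where the key is present, i.e. where Python A returns instead of raising KeyError)
def speakerOf (d : List (String × String)) : String :=
  ((d.find? (fun kv => kv.1 == "speaker")).map Prod.snd).getD ""

-- ===== PORT A =====
def filter_speakers (speakers_list : List (List (String × String))) : List (String × List (List (String × String))) :=
  (speakers_list.foldl (fun filtered_dict dictionary =>
      let speaker := speakerOf dictionary
      let filtered_dict := if filtered_dict.contains speaker then filtered_dict
                           else filtered_dict.insert speaker []
      filtered_dict.modify speaker [] (fun v => v ++ [dictionary]))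
    PySem.Dict.empty).items

-- ===== PORT B =====
def filter_speakers_alt (speakers_list : List (List (String × String))) : List (String × List (List (String × String))) :=
  (PySem.List.dedup (speakers_list.map speakerOf)).map
    (fun s => (s, speakers_list.filter (fun d => speakerOf d == s)))

-- ===== PRECONDITION & SPEC =====
-- Pre_: every dictionary has a "speaker" key (otherwise Python A raises KeyError, and B raises it too).
def Pre_filter_speakers (speakers_list : List (List (String × String))) : Prop :=
  (speakers_list.all (fun d => d.any (fun kv => kv.1 == "speaker"))) = true
instance (speakers_list : List (List (String × String))) : Decidable (Pre_filter_speakers speakers_list) := by unfold Pre_filter_speakers; infer_instance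
def pvWitness_filter_speakers : (List (List (String × String))) :=
  [[("speaker", "alice"), ("text", "hi")], [("speaker", "bob")], [("speaker", "alice"), ("text", "yo")]]

def Spec_filter_speakers (speakers_list : List (List (String × String))) (out : List (String × List (List (String × String)))) : Prop := out = filter_speakers_alt speakers_list
instance (speakers_list : List (List (String × String))) (out : List (String × List (List (String × String)))) : Decidable (Spec_filter_speakers speakers_list out) := by unfold Spec_filter_speakers; infer_instance

-- ===== CLAIM (what is proved, stated in full; the proofs are below) =====
def Claim_equal_filter_speakers : Prop := ∀ (speakers_list : List (List (String × String))), Dom_filter_speakers speakers_list → Pre_filter_speakers speakers_list → Spec_filter_speakers speakers_list (filter_speakers speakers_list)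

-- ===== LEMMAS AND PROOFS =====

-- A's "if absent insert [] then append" step is one modify-with-default step.
theorem stepA_eq_modify (acc : PySem.Dict String (List (List (String × String)))) (s : String) (d : List (String × String)) :
    (if acc.contains s then acc else acc.insert s []).modify s [] (fun v => v ++ [d])
      = acc.modify s [] (fun v => v ++ [d]) := by
  by_cases h : acc.contains s = true
  · simp [h]
  · rw [Bool.not_eq_true] at h
    simp only [h, Bool.false_eq_true, if_false, PySem.Dict.modify]
    rw [PySem.Dict.getD_insert_self, PySem.Dict.getD_of_not_contains (h := h)]
    rw [PySem.Dict.insert_insert_self]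

-- A's loop is the plain modify-with-default loop over (speaker, dictionary) pairs.
theorem fold_eq_pairs (l : List (List (String × String))) :
    (l.foldl (fun acc d =>
        let speaker := speakerOf d
        let acc := if acc.contains speaker then acc else acc.insert speaker []
        acc.modify speaker [] (fun v => v ++ [d]))
      PySem.Dict.empty)
      = ((l.map (fun d => (speakerOf d, d))).foldl
          (fun acc p => acc.modify p.1 [] (fun v => v ++ [p.2])) PySem.Dict.empty) := by
  rw [List.foldl_map]
  apply PySem.List.foldl_congr_mem
  intro acc d _
  simp only []
  exact stepA_eq_modify acc (speakerOf d) d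

-- items of the pair loop are exactly B's distinct-keys-then-filter shape.
theorem items_pairs_fold (l : List (List (String × String))) :
    ((l.map (fun d => (speakerOf d, d))).foldl
        (fun acc p => acc.modify p.1 [] (fun v => v ++ [p.2])) PySem.Dict.empty).items
    = (PySem.List.dedup (l.map speakerOf)).map
        (fun s => (s, l.filter (fun d => speakerOf d == s))) := by
  set L := l.map (fun d => (speakerOf d, d)) with hL
  set D := L.foldl (fun acc p => acc.modify p.1 [] (fun v => v ++ [p.2])) PySem.Dict.empty with hD
  have hnd : D.keys.Nodup := by
    rw [hD]
    exact PySem.Dict.nodup_keys_foldl_modify_key L Prod.fst [] (fun acc p v => v ++ [p.2]) _ (by simp [PySem.Dict.keys_empty])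
  have hkeys : D.keys = PySem.List.dedup (l.map speakerOf) := by
    rw [hD]
    rw [PySem.Dict.keys_foldl_modify_key (key := Prod.fst) (f := fun acc p v => v ++ [p.2])]
    simp [PySem.Dict.keys_empty, PySem.List.dedup_eq_ofList, hL, PySem.Set.update, PySem.Set.ofList, List.map_map]
    rfl
  have hget : ∀ k, D.getD k [] = l.filter (fun d => speakerOf d == k) := by
    intro k
    rw [hD, PySem.Dict.getD_foldl_modify_append]
    simp [hL, List.filter_map, PySem.Dict.getD_empty, List.map_map, Function.comp_def]
  rw [PySem.Dict.items_eq_map_keys D hnd ([] : List (List (String × String))), hkeys]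
  exact List.map_congr_left (fun k _ => by rw [hget k])

-- ===== VERDICT (by name: the statement is the Claim_ definition above) =====
theorem filter_speakers_spec : Claim_equal_filter_speakers := by
  intro l _ _
  unfold Spec_filter_speakers filter_speakers filter_speakers_alt
  rw [fold_eq_pairs]
  exact items_pairs_fold l
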